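-- pv_equiv track=rewrite | github.com/bex-sugartown/sugartown-cms | build_resume.py | get_variant_content
-- ===== SOURCE A (Python) =====
-- MASTER_VARIANT = "CMS-DS-PDM-01"
--
-- def get_variant_content(slot, target_role):
--     # 1. Exact Match
--     for v in slot['variants']:
--         if v['type'] == target_role:
--             return v['content']
--     # 2. Master Fallback
--     if target_role != MASTER_VARIANT:
--         for v in slot['variants']:
--             if v['type'] == MASTER_VARIANT:
--                 return v['content']
--     return None
-- ===== SOURCE B (Python) =====
-- MASTER_VARIANT = "CMS-DS-PDM-01"
--
-- def get_variant_content(slot, target_role):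
--     fallback = None
--     for v in slot['variants']:
--         if v['type'] == target_role:
--             return v['content']
--         if fallback is None and target_role != MASTER_VARIANT and v['type'] == MASTER_VARIANT:
--             fallback = v
--     return fallback['content'] if fallback is not None else None
-- ===== Notes on version B (the rewrite author's own statement) =====
-- stated objective: simpler
-- what changed: Replaced A's two sequential scans (exact match, then a second scan for the master fallback) with one pass that returns on an exact match and records the first master variant as a fallback whose content is read only after the loop.
import Mathlib
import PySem

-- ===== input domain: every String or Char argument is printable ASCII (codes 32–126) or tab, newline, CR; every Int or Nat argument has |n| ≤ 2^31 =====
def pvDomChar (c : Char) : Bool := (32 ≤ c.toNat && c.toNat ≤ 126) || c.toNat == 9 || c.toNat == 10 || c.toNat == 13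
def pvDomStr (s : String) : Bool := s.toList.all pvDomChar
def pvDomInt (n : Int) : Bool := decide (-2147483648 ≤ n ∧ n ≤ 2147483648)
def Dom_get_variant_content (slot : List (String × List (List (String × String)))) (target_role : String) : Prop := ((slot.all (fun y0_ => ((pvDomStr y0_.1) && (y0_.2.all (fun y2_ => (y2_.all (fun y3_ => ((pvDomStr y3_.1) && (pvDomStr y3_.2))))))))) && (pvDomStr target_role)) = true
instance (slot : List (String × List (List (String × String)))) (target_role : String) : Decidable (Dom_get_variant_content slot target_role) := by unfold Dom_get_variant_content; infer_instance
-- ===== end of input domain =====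

-- B collapses A's two sequential scans into one pass that records the first master variant as a
-- fallback and reads its content only after the loop (objective: simpler).

def pvMASTER : String := "CMS-DS-PDM-01"

-- ===== PORT A =====
-- A's first loop: first v with v['type'] == target_role ↦ v['content']
def pvExactScan (vs : List (List (String × String))) (target_role : String) : Option String :=
  match vs with
  | [] => none
  | v :: rest =>
    if (PySem.Dict.mk v).get? "type" = some target_role then (PySem.Dict.mk v).get? "content"
    else pvExactScan rest target_role

-- A's second loop: first v with v['type'] == MASTER_VARIANT ↦ v['content']
def pvMasterScan (vs : List (List (String × String))) : Option String :=
  match vs with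
  | [] => none
  | v :: rest =>
    if (PySem.Dict.mk v).get? "type" = some pvMASTER then (PySem.Dict.mk v).get? "content"
    else pvMasterScan rest

def get_variant_content (slot : List (String × List (List (String × String)))) (target_role : String) : Option String :=
  let vs := ((PySem.Dict.mk slot).get? "variants").getD []
  match pvExactScan vs target_role with
  | some c => some c
  | none => if target_role ≠ pvMASTER then pvMasterScan vs else none

-- ===== PORT B =====
-- single pass: early return on exact match, record the first master variant dict as fallback;
-- the fallback's content is read only after the loop
def pvScan (vs : List (List (String × String))) (target_role : String)
    (fallback : Option (List (String × String))) : Option String :=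
  match vs with
  | [] =>
    match fallback with
    | some f => (PySem.Dict.mk f).get? "content"
    | none => none
  | v :: rest =>
    if (PySem.Dict.mk v).get? "type" = some target_role then (PySem.Dict.mk v).get? "content"
    else if fallback = none ∧ target_role ≠ pvMASTER ∧ (PySem.Dict.mk v).get? "type" = some pvMASTER then
      pvScan rest target_role (some v)
    else pvScan rest target_role fallback

def get_variant_content_alt (slot : List (String × List (List (String × String)))) (target_role : String) : Option String :=
  pvScan (((PySem.Dict.mk slot).get? "variants").getD []) target_role none

-- ===== PRECONDITION & SPEC =====
def pvHasT (v : List (String × String)) : Bool := ((PySem.Dict.mk v).get? "type").isSome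
def pvHasC (v : List (String × String)) : Bool := ((PySem.Dict.mk v).get? "content").isSome
def pvTEq (v : List (String × String)) (r : String) : Bool := (PySem.Dict.mk v).get? "type" == some r

-- Pre_ excludes exactly the inputs on which Python A raises KeyError (B raises on the same inputs):
-- slot lacking 'variants'; a variant scanned before the first exact match lacking 'type'; the
-- matched variant lacking 'content'; or, with no exact match, the first master variant lacking
-- 'content' when the fallback would be returned.
def pvPreList (vs : List (List (String × String))) (role : String) : Bool :=
  match vs.find? (fun v => !pvHasT v || pvTEq v role) with
  | some m => pvHasT m && pvHasC m
  | none => role == pvMASTER ||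
      (match vs.find? (fun u => pvTEq u pvMASTER) with
       | some w => pvHasC w
       | none => true)

def Pre_get_variant_content (slot : List (String × List (List (String × String)))) (target_role : String) : Prop :=
  ((PySem.Dict.mk slot).get? "variants").isSome = true ∧
  pvPreList (((PySem.Dict.mk slot).get? "variants").getD []) target_role = true
instance (slot : List (String × List (List (String × String)))) (target_role : String) : Decidable (Pre_get_variant_content slot target_role) := by unfold Pre_get_variant_content; infer_instance

def pvWitness_get_variant_content : (List (String × List (List (String × String)))) × String :=
  ([("variants", [[("type", "CMS-DS-PDM-01"), ("content", "m")], [("type", "r"), ("content", "c")]])], "r")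

def Spec_get_variant_content (slot : List (String × List (List (String × String)))) (target_role : String) (out : Option String) : Prop := out = get_variant_content_alt slot target_role
instance (slot : List (String × List (List (String × String)))) (target_role : String) (out : Option String) : Decidable (Spec_get_variant_content slot target_role out) := by unfold Spec_get_variant_content; infer_instance

-- ===== CLAIM (what is proved, stated in full; the proofs are below) =====
def Claim_equal_get_variant_content : Prop := ∀ (slot : List (String × List (List (String × String)))) (target_role : String), Dom_get_variant_content slot target_role → Pre_get_variant_content slot target_role → Spec_get_variant_content slot target_role (get_variant_content slot target_role)

-- ===== LEMMAS AND PROOFS =====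

-- condition on the rest of the list once a master has been recorded: if B's scan still hits a
-- first "problem" variant (missing type or exact match), it is a match carrying content
def pvQ (vs : List (List (String × String))) (role : String) : Bool :=
  match vs.find? (fun v => !pvHasT v || pvTEq v role) with
  | some m => pvHasT m && pvHasC m
  | none => true

theorem pvScan_found (vs : List (List (String × String))) (role : String) (f : List (String × String))
    (hq : pvQ vs role = true) :
    pvScan vs role (some f) =
      (match pvExactScan vs role with
       | some c => some c
       | none => (PySem.Dict.mk f).get? "content") := by
  induction vs with
  | nil => simp [pvScan, pvExactScan]
  | cons v rest ih =>
    unfold pvQ at hq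
    rcases ht : (PySem.Dict.mk v).get? "type" with _ | t
    · have hp : (fun v => !pvHasT v || pvTEq v role) v = true := by simp [pvHasT, pvTEq, ht]
      rw [List.find?_cons_of_pos (p := fun v => !pvHasT v || pvTEq v role) hp] at hq
      simp [pvHasT, ht] at hq
    · by_cases h1 : t = role
      · have ht' : (PySem.Dict.mk v).get? "type" = some role := by rw [ht, h1]
        have hp : (fun v => !pvHasT v || pvTEq v role) v = true := by simp [pvHasT, pvTEq, ht']
        rw [List.find?_cons_of_pos (p := fun v => !pvHasT v || pvTEq v role) hp] at hq
        simp only [pvHasT, pvHasC, Bool.and_eq_true] at hq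
        obtain ⟨c, hc⟩ := Option.isSome_iff_exists.mp hq.2
        simp [pvScan, pvExactScan, ht', hc]
      · have hp : ¬ ((fun v => !pvHasT v || pvTEq v role) v = true) := by
          simp [pvHasT, pvTEq, ht, h1]
        rw [List.find?_cons_of_neg (p := fun v => !pvHasT v || pvTEq v role) hp] at hq
        have hne : ¬ ((PySem.Dict.mk v).get? "type" = some role) := by simp [ht, h1]
        simp [pvScan, pvExactScan, hne, ih hq]

theorem pvScan_main (vs : List (List (String × String))) (role : String)
    (hpre : pvPreList vs role = true) :
    pvScan vs role none =
      (match pvExactScan vs role with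
       | some c => some c
       | none => if role ≠ pvMASTER then pvMasterScan vs else none) := by
  induction vs with
  | nil => simp [pvScan, pvExactScan, pvMasterScan]
  | cons v rest ih =>
    unfold pvPreList at hpre
    rcases ht : (PySem.Dict.mk v).get? "type" with _ | t
    · have hp : (fun v => !pvHasT v || pvTEq v role) v = true := by simp [pvHasT, pvTEq, ht]
      rw [List.find?_cons_of_pos (p := fun v => !pvHasT v || pvTEq v role) hp] at hpre
      simp [pvHasT, ht] at hpre
    · by_cases h1 : t = role
      · have ht' : (PySem.Dict.mk v).get? "type" = some role := by rw [ht, h1]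
        have hp : (fun v => !pvHasT v || pvTEq v role) v = true := by simp [pvHasT, pvTEq, ht']
        rw [List.find?_cons_of_pos (p := fun v => !pvHasT v || pvTEq v role) hp] at hpre
        simp only [pvHasT, pvHasC, Bool.and_eq_true] at hpre
        obtain ⟨c, hc⟩ := Option.isSome_iff_exists.mp hpre.2
        simp [pvScan, pvExactScan, ht', hc]
      · have hp : ¬ ((fun v => !pvHasT v || pvTEq v role) v = true) := by
          simp [pvHasT, pvTEq, ht, h1]
        rw [List.find?_cons_of_neg (p := fun v => !pvHasT v || pvTEq v role) hp] at hpre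
        have hne : ¬ ((PySem.Dict.mk v).get? "type" = some role) := by simp [ht, h1]
        by_cases hm : t = pvMASTER
        · subst hm
          have hrm : role ≠ pvMASTER := fun e => h1 e.symm
          -- derive pvQ rest from hpre
          have hq : pvQ rest role = true := by
            unfold pvQ
            cases hf : rest.find? (fun v => !pvHasT v || pvTEq v role) with
            | none => rfl
            | some m =>
              rw [hf] at hpre
              exact hpre
          have hstep : pvScan (v :: rest) role none = pvScan rest role (some v) := by
            simp [pvScan, ht, h1, hrm]
          rw [hstep, pvScan_found rest role v hq]
          have hfr : pvExactScan (v :: rest) role = pvExactScan rest role := by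
            simp [pvExactScan, hne]
          have hfm : pvMasterScan (v :: rest) = (PySem.Dict.mk v).get? "content" := by
            simp [pvMasterScan, ht]
          rw [hfr, hfm]
          cases pvExactScan rest role <;> simp [hrm]
        · -- neither a match nor a master: both programs just skip v
          have hnm : ¬ ((PySem.Dict.mk v).get? "type" = some pvMASTER) := by simp [ht, hm]
          have hmm : ¬ ((fun u => pvTEq u pvMASTER) v = true) := by simp [pvTEq, ht, hm]
          rw [List.find?_cons_of_neg (p := fun u => pvTEq u pvMASTER) hmm] at hpre
          have hpre' : pvPreList rest role = true := by unfold pvPreList; exact hpre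
          have hstep : pvScan (v :: rest) role none = pvScan rest role none := by
            simp [pvScan, hne, hnm]
          have hfr : pvExactScan (v :: rest) role = pvExactScan rest role := by
            simp [pvExactScan, hne]
          have hfm : pvMasterScan (v :: rest) = pvMasterScan rest := by
            simp [pvMasterScan, hnm]
          rw [hstep, hfr, hfm, ih hpre']

-- ===== VERDICT (by name: the statement is the Claim_ definition above) =====
theorem get_variant_content_spec : Claim_equal_get_variant_content := by
  intro slot target_role _ hpre
  obtain ⟨_, hpl⟩ := hpre
  unfold Spec_get_variant_content get_variant_content get_variant_content_alt
  rw [pvScan_main _ _ hpl]
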